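-- pv_equiv track=rewrite | github.com/ursaturnine/MasterMind-Game | src/MasterMind.py | matchNums
-- ===== SOURCE A (Python) =====
-- import copy
--
-- def matchNums(guess, word):
--     wordCopy = copy.deepcopy(word)
--
--     correctChars = 0
--     for char in guess:
--         if char in word:
--             occurrences = wordCopy[char][1]
--             if occurrences > 0:
--                 correctChars += 1
--                 wordCopy[char][1] -= 1
--
--     return correctChars
-- ===== SOURCE B (Python) =====
-- def matchNums(guess, word):
--     # One read-only pass over the word dict: each guessed letter can match
--     # at most min(times guessed, letters available); no deepcopy, no mutation.
--     total = 0
--     for ch, vals in word.items():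
--         if ch in guess:
--             avail = vals[1]
--             if avail > 0:
--                 total += min(guess.count(ch), avail)
--     return total
-- ===== Notes on version B (the rewrite author's own statement) =====
-- stated objective: simpler
-- what changed: A deep-copies the word dict and loops over guess decrementing per-letter availability; B makes one read-only pass over the word dict, adding min(guess.count(ch), available) per key, with no copy and no mutation.
import Mathlib
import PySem

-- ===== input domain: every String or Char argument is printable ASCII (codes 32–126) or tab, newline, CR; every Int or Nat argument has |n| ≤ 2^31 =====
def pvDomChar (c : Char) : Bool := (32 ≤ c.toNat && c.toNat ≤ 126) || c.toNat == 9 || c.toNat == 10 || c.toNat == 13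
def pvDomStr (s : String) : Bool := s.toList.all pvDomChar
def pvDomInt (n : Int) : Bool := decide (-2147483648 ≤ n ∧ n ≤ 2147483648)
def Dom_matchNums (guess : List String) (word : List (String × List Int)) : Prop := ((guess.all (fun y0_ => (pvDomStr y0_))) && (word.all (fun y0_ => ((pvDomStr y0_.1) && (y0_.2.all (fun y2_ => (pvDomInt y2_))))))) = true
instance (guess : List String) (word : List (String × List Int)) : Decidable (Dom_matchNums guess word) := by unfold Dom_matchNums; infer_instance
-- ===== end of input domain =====

-- B replaces A's deepcopy-and-decrement loop over `guess` by one read-only pass over the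
-- `word` dict adding min(times guessed, letters available) per key; same return value
-- (neither the caller's `word` nor `guess` is mutated by either version).

-- ===== PORT A =====
-- A's loop over guess, carrying the mutable copy `wordCopy` (here `d`); the membership
-- test `char in word` reads the original dict `w`, exactly as in the Python.
def matchAuxA (w : PySem.Dict String (List Int)) : List String → PySem.Dict String (List Int) → Int
  | [], _ => 0
  | c :: rest, d =>
    if w.contains c then
      let occ := PySem.List.pyGetD (d.getD c []) 1 0   -- wordCopy[char][1] (raises outside Pre_)
      if occ > 0 then
        1 + matchAuxA w rest (d.insert c (PySem.List.pySetD (d.getD c []) 1 (occ - 1)))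
      else matchAuxA w rest d
    else matchAuxA w rest d

def matchNums (guess : List String) (word : List (String × List Int)) : Int :=
  matchAuxA (PySem.Dict.mk word) guess (PySem.Dict.mk word)

-- ===== PORT B =====
def matchNums_alt (guess : List String) (word : List (String × List Int)) : Int :=
  word.foldl (fun total p =>
    if guess.contains p.1 then
      let avail := PySem.List.pyGetD p.2 1 0           -- vals[1] (raises outside Pre_)
      if avail > 0 then total + min ((guess.count p.1 : Int)) avail else total
    else total) 0

-- ===== PRECONDITION & SPEC =====
-- Pre_ excludes (1) inputs where both Pythons raise IndexError: some guessed char is a key of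
-- word whose value list has fewer than 2 elements; (2) assoc lists with duplicate keys, which
-- no Python dict can represent (A reads the first binding, B would count every binding).
def Pre_matchNums (guess : List String) (word : List (String × List Int)) : Prop :=
  (word.map Prod.fst).Nodup ∧
  ∀ c ∈ guess, ∀ v, (PySem.Dict.mk word).get? c = some v → 2 ≤ v.length
instance (guess : List String) (word : List (String × List Int)) : Decidable (Pre_matchNums guess word) := by unfold Pre_matchNums; infer_instance

def pvWitness_matchNums : List String × (List (String × List Int)) :=
  (["a", "b", "a"], [("a", [0, 2]), ("c", [1, 1])])

def Spec_matchNums (guess : List String) (word : List (String × List Int)) (out : Int) : Prop := out = matchNums_alt guess word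
instance (guess : List String) (word : List (String × List Int)) (out : Int) : Decidable (Spec_matchNums guess word out) := by unfold Spec_matchNums; infer_instance

-- ===== CLAIM (what is proved, stated in full; the proofs are below) =====
def Claim_equal_matchNums : Prop := ∀ (guess : List String) (word : List (String × List Int)), Dom_matchNums guess word → Pre_matchNums guess word → Spec_matchNums guess word (matchNums guess word)

-- ===== LEMMAS AND PROOFS =====

-- per-entry contribution of B, as a function of the remaining guess
def contrib (guess : List String) (p : String × List Int) : Int :=
  if p.1 ∈ guess ∧ 0 < PySem.List.pyGetD p.2 1 0
  then min ((guess.count p.1 : Int)) (PySem.List.pyGetD p.2 1 0) else 0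

lemma contrib_nil (p : String × List Int) : contrib [] p = 0 := by
  simp [contrib]

lemma contrib_cons_of_ne (c : String) (rest : List String) (p : String × List Int)
    (h : p.1 ≠ c) : contrib (c :: rest) p = contrib rest p := by
  simp [contrib, h, Ne.symm h]

-- B's fold equals the sum of contributions
lemma alt_eq_sum (guess : List String) :
    ∀ (l : List (String × List Int)) (acc : Int),
      l.foldl (fun total p =>
        if guess.contains p.1 then
          let avail := PySem.List.pyGetD p.2 1 0
          if avail > 0 then total + min ((guess.count p.1 : Int)) avail else total
        else total) acc = acc + (l.map (contrib guess)).sum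
  | [], acc => by simp
  | p :: l, acc => by
    rw [List.foldl_cons, alt_eq_sum guess l]
    have : (if guess.contains p.1 then
        if PySem.List.pyGetD p.2 1 0 > 0 then
          acc + min ((guess.count p.1 : Int)) (PySem.List.pyGetD p.2 1 0) else acc
      else acc) = acc + contrib guess p := by
      simp only [contrib, List.contains_eq_mem]
      by_cases hm : p.1 ∈ guess <;> by_cases hp : 0 < PySem.List.pyGetD p.2 1 0 <;>
        simp [hm, hp]
    simp only [List.map_cons, List.sum_cons]
    rw [this]; ring

-- sums over the same items agree when every contribution agrees
lemma sum_congr_items {l : List (String × List Int)} {F G : (String × List Int) → Int}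
    (h : ∀ p ∈ l, F p = G p) : (l.map F).sum = (l.map G).sum := by
  rw [List.map_congr_left h]

-- one entry (the unique one with key c) contributes one more under F than under G
lemma sum_one_diff (c : String) (F G : (String × List Int) → Int) :
    ∀ (l : List (String × List Int)), (l.map Prod.fst).Nodup → c ∈ l.map Prod.fst →
      (∀ p ∈ l, p.1 ≠ c → F p = G p) → (∀ p ∈ l, p.1 = c → F p = 1 + G p) →
      (l.map F).sum = 1 + (l.map G).sum
  | [], _, hc, _, _ => by simp at hc
  | p :: l, hnd, hc, hne, heq => by
    simp only [List.map_cons, List.sum_cons, List.nodup_cons] at hnd ⊢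
    by_cases hp : p.1 = c
    · have : ∀ q ∈ l, F q = G q := by
        intro q hq
        exact hne q (List.mem_cons_of_mem _ hq)
          (fun h => hnd.1 (hp ▸ h ▸ List.mem_map_of_mem hq))
      rw [heq p (List.mem_cons_self) hp, sum_congr_items this]; ring
    · have hc' : c ∈ l.map Prod.fst := by
        rcases List.mem_map.mp hc with ⟨q, hq, hq1⟩
        rcases List.mem_cons.mp hq with h | h
        · exact absurd (h ▸ hq1) hp
        · exact hq1 ▸ List.mem_map_of_mem h
      rw [hne p (List.mem_cons_self) hp,
          sum_one_diff c F G l hnd.2 hc'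
            (fun q hq => hne q (List.mem_cons_of_mem _ hq))
            (fun q hq => heq q (List.mem_cons_of_mem _ hq))]
      ring

-- if the value list is too short to index, pyGetD 1 yields the default 0
lemma pyGetD_one_short {v : List Int} (h : v.length < 2) : PySem.List.pyGetD v 1 0 = 0 := by
  match v, h with
  | [], _ => rfl
  | [x], _ => rfl

lemma pyGetD_one_set {v : List Int} (h : 2 ≤ v.length) (x : Int) :
    PySem.List.pyGetD (v.set 1 x) 1 0 = x := by
  match v, h with
  | a :: b :: t, _ =>
    show PySem.List.pyGetD (a :: x :: t) 1 0 = x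
    simp [PySem.List.pyGetD, PySem.List.pyGet?, PySem.List.pyIdx?]

-- the key invariant: A's loop over the remaining guess, from any state d with the
-- same keys as w, computes the sum of B's contributions over d's current items
lemma matchAuxA_eq (w : PySem.Dict String (List Int)) (hw : w.keys.Nodup) :
    ∀ (guess : List String) (d : PySem.Dict String (List Int)), d.keys = w.keys →
      matchAuxA w guess d = (d.items.map (contrib guess)).sum
  | [], d, _ => by
    rw [matchAuxA]
    rw [sum_congr_items (G := fun _ => 0) (fun p _ => contrib_nil p)]
    simp
  | c :: rest, d, hkeys => by
    have hndd : d.keys.Nodup := hkeys ▸ hw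
    rw [matchAuxA]
    by_cases hcw : w.contains c = true
    · have hcd : d.contains c = true := by
        rw [PySem.Dict.contains_iff_mem_keys _ c] at hcw ⊢
        rw [hkeys]; exact hcw
      have hsome : (d.get? c).isSome := by
        rw [← PySem.Dict.contains_eq_isSome_get?]; exact hcd
      obtain ⟨v, hv⟩ := Option.isSome_iff_exists.mp hsome
      have hgetD : d.getD c [] = v := PySem.Dict.getD_of_get?_eq_some _ _ hv
      have hcmem : c ∈ d.items.map Prod.fst := by
        have := (PySem.Dict.contains_iff_mem_keys d c).mp hcd
        simpa [PySem.Dict.keys] using this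
      -- every item with key c IS (c, v)
      have huniq : ∀ p ∈ d.items, p.1 = c → p = (c, v) := by
        rintro ⟨k, u⟩ hp rfl
        have := PySem.Dict.get?_of_mem_items d hp hndd
        rw [hv] at this
        simpa using this.symm
      simp only [hgetD, hcw, if_true]
      set occ := PySem.List.pyGetD v 1 0 with hocc
      by_cases hpos : occ > 0
      · have hlen : 2 ≤ v.length := by
          by_contra h
          rw [hocc, pyGetD_one_short (by omega)] at hpos; omega
        simp only [hpos, if_true]
        set v' := PySem.List.pySetD v 1 (occ - 1) with hv'
        have hv'set : v' = v.set 1 (occ - 1) := by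
          rw [hv']
          exact_mod_cast PySem.List.pySetD_natCast v 1 (occ - 1)
        set d' := d.insert c v' with hd'
        have hkeys' : d'.keys = w.keys := by
          rw [hd', PySem.Dict.keys_insert_of_contains _ _ hcd, hkeys]
        rw [matchAuxA_eq w hw rest d' hkeys']
        have hitems' : d'.items = d.items.map (fun p => if p.1 == c then (c, v') else p) :=
          PySem.Dict.items_insert_of_contains _ _ hcd
        rw [hitems', List.map_map]
        refine (sum_one_diff c _ _ d.items hndd hcmem ?_ ?_).symm
        · intro p hp hne
          simp only [Function.comp, beq_iff_eq, hne, if_false]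
          exact contrib_cons_of_ne c rest p hne
        · intro p hp hpc
          have hpv := huniq p hp hpc
          subst hpv
          simp only [Function.comp, beq_self_eq_true, if_true]
          have hget' : PySem.List.pyGetD v' 1 0 = occ - 1 := by
            rw [hv'set]; exact pyGetD_one_set hlen _
          simp only [contrib, hget', ← hocc, List.mem_cons]
          have hcnt : ((c :: rest).count c : Int) = (rest.count c : Int) + 1 := by
            rw [List.count_cons_self]; push_cast; ring
          by_cases hcr : c ∈ rest
          · by_cases h1 : 0 < occ - 1
            · simp only [hpos, hcr, or_true, h1, and_true, if_true, hcnt]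
              omega
            · have hocc1 : occ = 1 := by omega
              have : (0:Int) ≤ (rest.count c : Int) := Int.natCast_nonneg _
              simp only [hcnt, hocc1]
              norm_num
          · have hcnt0 : (rest.count c : Int) = 0 := by
              simp [List.count_eq_zero_of_not_mem hcr]
            simp only [hpos, hcr, false_and, if_false, if_true, true_or, true_and, hcnt, hcnt0]
            omega
      · simp only [hpos, if_false]
        rw [matchAuxA_eq w hw rest d hkeys]
        refine (sum_congr_items ?_).symm
        intro p hp
        by_cases hpc : p.1 = c
        · have hpv := huniq p hp hpc
          subst hpv
          simp [contrib, ← hocc, hpos]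
        · exact contrib_cons_of_ne c rest p hpc
    · -- c not a key: no item has key c, every contribution is unchanged
      rw [matchAuxA_eq w hw rest d hkeys]
      simp only [hcw]
      apply sum_congr_items
      intro p hp
      refine (contrib_cons_of_ne c rest p ?_).symm
      intro hpc
      apply hcw
      rw [PySem.Dict.contains_iff_mem_keys _ c, ← hkeys]
      exact hpc ▸ (by simpa [PySem.Dict.keys] using List.mem_map_of_mem (f := Prod.fst) hp)

-- ===== VERDICT (by name: the statement is the Claim_ definition above) =====
theorem matchNums_spec : Claim_equal_matchNums := by
  intro guess word _ hpre
  unfold Spec_matchNums matchNums matchNums_alt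
  have hnd : (PySem.Dict.mk word).keys.Nodup := by
    simpa [PySem.Dict.keys] using hpre.1
  rw [matchAuxA_eq (PySem.Dict.mk word) hnd guess (PySem.Dict.mk word) rfl,
      alt_eq_sum guess word 0]
  simp
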